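-- pv_equiv track=rewrite | github.com/kotashashank/LL-LAB | LL-Lab/draw_circuit.py | gate_prep
-- ===== SOURCE A (Python) =====
-- def gate_prep(output):
--     nextGate = nextPort = nextWire = False
--     gates = []
--     ports = []
--     wires = []
--     for line in output:
--         if (nextGate):
--             gates.append(line.strip())
--             nextGate = False
--         elif (nextWire):
--             wires.append(line.strip())
--             nextWire = False
--         elif (nextPort):
--             ports.append(line.strip())
--             nextPort = False
--         elif ("creating" in line):
--             if ("wire" in line):
--                 nextWire = True
--             elif ("port" in line):
--                 nextPort = True
--             elif ("gate" in line):
--                 nextGate = True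
--             else:
--                 exit(0)
--     return gates, ports, wires
-- ===== SOURCE B (Python) =====
-- def gate_prep(output):
--     gates = []
--     ports = []
--     wires = []
--     i = 0
--     n = len(output)
--     while i < n:
--         line = output[i]
--         if "creating" in line:
--             if "wire" in line:
--                 tgt = wires
--             elif "port" in line:
--                 tgt = ports
--             elif "gate" in line:
--                 tgt = gates
--             else:
--                 exit(0)
--             if i + 1 < n:
--                 tgt.append(output[i + 1].strip())
--             i += 2
--         else:
--             i += 1
--     return gates, ports, wires
-- ===== Notes on version B (the rewrite author's own statement) =====
-- stated objective: simpler
-- what changed: Replaces A's three carry-over boolean flags (next-line state machine) with a single index loop that, on a 'creating' line, looks ahead to output[i+1], appends it to the selected list, and advances by 2.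
import Mathlib
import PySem

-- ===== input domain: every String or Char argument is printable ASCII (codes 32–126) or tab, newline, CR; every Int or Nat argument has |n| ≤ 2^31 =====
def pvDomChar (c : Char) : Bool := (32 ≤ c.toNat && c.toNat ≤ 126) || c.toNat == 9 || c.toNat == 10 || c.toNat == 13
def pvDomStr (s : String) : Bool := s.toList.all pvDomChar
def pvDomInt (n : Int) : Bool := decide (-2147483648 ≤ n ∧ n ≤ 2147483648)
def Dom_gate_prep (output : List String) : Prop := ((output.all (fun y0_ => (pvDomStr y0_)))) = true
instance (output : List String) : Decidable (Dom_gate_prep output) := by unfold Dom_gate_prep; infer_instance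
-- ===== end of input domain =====

-- B drops A's three carry-over boolean flags in favour of an index loop with one-line lookahead (same values; simpler).


-- ===== PORT A =====
-- loop over the lines carrying the flags nextGate/nextPort/nextWire and the three accumulators
def gatePrepLoopA (ng np nw : Bool) (g p w : List String) : List String → List String × List String × List String
  | [] => (g, p, w)
  | line :: rest =>
    if ng then gatePrepLoopA false np nw (g ++ [PySem.Str.strip line]) p w rest
    else if nw then gatePrepLoopA ng np false g p (w ++ [PySem.Str.strip line]) rest
    else if np then gatePrepLoopA ng false nw g (p ++ [PySem.Str.strip line]) w rest
    else if PySem.Str.isIn "creating" line then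
      if PySem.Str.isIn "wire" line then gatePrepLoopA ng np true g p w rest
      else if PySem.Str.isIn "port" line then gatePrepLoopA ng true nw g p w rest
      else if PySem.Str.isIn "gate" line then gatePrepLoopA true np nw g p w rest
      else (g, p, w)   -- exit(0): A raises SystemExit here; excluded by Pre_gate_prep
    else gatePrepLoopA ng np nw g p w rest

def gate_prep (output : List String) : List String × List String × List String :=
  gatePrepLoopA false false false [] [] [] output

-- ===== PORT B =====
-- index loop of Source B as structural recursion on the remaining lines: a 'creating' line consumes
-- the next line (i += 2, with the i+1 < n bounds check), any other line is skipped (i += 1)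
def gatePrepLoopB (g p w : List String) : List String → List String × List String × List String
  | [] => (g, p, w)
  | line :: rest =>
    if PySem.Str.isIn "creating" line then
      if PySem.Str.isIn "wire" line then
        match rest with
        | [] => (g, p, w)
        | v :: rest' => gatePrepLoopB g p (w ++ [PySem.Str.strip v]) rest'
      else if PySem.Str.isIn "port" line then
        match rest with
        | [] => (g, p, w)
        | v :: rest' => gatePrepLoopB g (p ++ [PySem.Str.strip v]) w rest'
      else if PySem.Str.isIn "gate" line then
        match rest with
        | [] => (g, p, w)
        | v :: rest' => gatePrepLoopB (g ++ [PySem.Str.strip v]) p w rest'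
      else (g, p, w)   -- exit(0): excluded by Pre_gate_prep
    else gatePrepLoopB g p w rest

def gate_prep_alt (output : List String) : List String × List String × List String :=
  gatePrepLoopB [] [] [] output

-- ===== PRECONDITION & SPEC =====
-- Pre_ excludes lists containing a line with "creating" but none of "wire"/"port"/"gate": on a reached
-- such line A calls exit(0) (raises SystemExit, no return value); this slightly over-excludes the case
-- where such a line is only consumed as a value line, on which A and B return the same value (see cites).
def Pre_gate_prep (output : List String) : Prop :=
  ∀ line ∈ output, PySem.Str.isIn "creating" line = true →
    (PySem.Str.isIn "wire" line || PySem.Str.isIn "port" line || PySem.Str.isIn "gate" line) = true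
instance (output : List String) : Decidable (Pre_gate_prep output) := by unfold Pre_gate_prep; infer_instance

def pvWitness_gate_prep : List String :=
  ["creating gate AND2", "  and1 ", "noise line", "creating wire w", " w1\t", "creating port clk", "clk"]

def Spec_gate_prep (output : List String) (out : List String × List String × List String) : Prop := out = gate_prep_alt output
instance (output : List String) (out : List String × List String × List String) : Decidable (Spec_gate_prep output out) := by unfold Spec_gate_prep; infer_instance

-- ===== CLAIM (what is proved, stated in full; the proofs are below) =====
def Claim_equal_gate_prep : Prop := ∀ (output : List String), Dom_gate_prep output → Pre_gate_prep output → Spec_gate_prep output (gate_prep output)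

-- ===== LEMMAS AND PROOFS =====

theorem gatePrep_key (n : Nat) :
    ∀ (rest : List String), rest.length ≤ n → Pre_gate_prep rest →
      ∀ g p w, gatePrepLoopA false false false g p w rest = gatePrepLoopB g p w rest := by
  induction n with
  | zero =>
    intro rest hlen _ g p w
    have : rest = [] := List.eq_nil_of_length_eq_zero (Nat.le_zero.mp hlen)
    subst this; rfl
  | succ n ih =>
    intro rest hlen hpre g p w
    cases rest with
    | nil => rfl
    | cons line rest' =>
      have hlen' : rest'.length ≤ n := Nat.le_of_succ_le_succ hlen
      have hpre' : Pre_gate_prep rest' := fun l hl => hpre l (List.mem_cons_of_mem _ hl)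
      by_cases hc : PySem.Str.isIn "creating" line = true
      · have hcls := hpre line (List.mem_cons_self) hc
        by_cases hw : PySem.Str.isIn "wire" line = true
        · cases rest' with
          | nil => simp [gatePrepLoopA, gatePrepLoopB]
          | cons v rest'' =>
            have hlen'' : rest''.length ≤ n := Nat.le_of_succ_le hlen'
            have hpre'' : Pre_gate_prep rest'' := fun l hl => hpre' l (List.mem_cons_of_mem _ hl)
            simp only [gatePrepLoopA, gatePrepLoopB, hc, hw, if_true, if_false,
              Bool.false_eq_true]
            rw [ih rest'' hlen'' hpre'']
        · by_cases hp : PySem.Str.isIn "port" line = true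
          · cases rest' with
            | nil => simp [gatePrepLoopA, gatePrepLoopB]
            | cons v rest'' =>
              have hlen'' : rest''.length ≤ n := Nat.le_of_succ_le hlen'
              have hpre'' : Pre_gate_prep rest'' := fun l hl => hpre' l (List.mem_cons_of_mem _ hl)
              simp only [gatePrepLoopA, gatePrepLoopB, hc, hw, hp, if_true, if_false,
                Bool.false_eq_true]
              rw [ih rest'' hlen'' hpre'']
          · have hg : PySem.Str.isIn "gate" line = true := by
              rw [Bool.or_eq_true, Bool.or_eq_true] at hcls
              rcases hcls with (h | h) | h
              · exact absurd h hw
              · exact absurd h hp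
              · exact h
            cases rest' with
            | nil => simp [gatePrepLoopA, gatePrepLoopB]
            | cons v rest'' =>
              have hlen'' : rest''.length ≤ n := Nat.le_of_succ_le hlen'
              have hpre'' : Pre_gate_prep rest'' := fun l hl => hpre' l (List.mem_cons_of_mem _ hl)
              simp only [gatePrepLoopA, gatePrepLoopB, hc, hw, hp, hg, if_true, if_false,
                Bool.false_eq_true]
              rw [ih rest'' hlen'' hpre'']
      · rw [Bool.not_eq_true] at hc
        cases rest' with
        | nil => simp [gatePrepLoopA, gatePrepLoopB]
        | cons v rest'' =>
          simp only [gatePrepLoopA, gatePrepLoopB, hc, Bool.false_eq_true, if_false]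
          exact ih (v :: rest'') hlen' hpre' g p w

-- ===== VERDICT (by name: the statement is the Claim_ definition above) =====
theorem gate_prep_spec : Claim_equal_gate_prep := by
  intro output _ hpre
  unfold Spec_gate_prep gate_prep gate_prep_alt
  exact gatePrep_key output.length output (Nat.le_refl _) hpre [] [] []
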